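-- pv_equiv track=rewrite | github.com/manojMadarasingha/videoTrainplusplus | start_generation_Netflix.py | cal_margin
-- ===== SOURCE A (Python) =====
-- def cal_margin(arr, consecutive_zeros):
--     margin, count = 0, 0
--
--     for i in range(1, len(arr)):
--         now = 0 if arr[i] < 400 else arr[i]
--         prev = 0 if arr[i] < 400 else arr[i]
--
--         if now == prev == 0:
--             count += 1
--             if count == 1:
--                 margin = i + 1
--             if count > consecutive_zeros:
--                 break
--         else:
--             count = 0
--     return margin
-- ===== SOURCE B (Python) =====
-- def cal_margin(arr, consecutive_zeros):
--     # Stage 1: collect maximal runs of sub-400 values over indices 1..len(arr)-1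
--     # as (margin_candidate = start_index + 1, run_length).
--     runs = []
--     n = len(arr)
--     i = 1
--     while i < n:
--         if arr[i] < 400:
--             j = i
--             while j < n and arr[j] < 400:
--                 j += 1
--             runs.append((i + 1, j - i))
--             i = j
--         else:
--             i += 1
--     # Stage 2: first run longer than consecutive_zeros wins; otherwise the
--     # last run's margin; otherwise 0.
--     for m, length in runs:
--         if length > consecutive_zeros:
--             return m
--     return runs[-1][0] if runs else 0
-- ===== Notes on version B (the rewrite author's own statement) =====
-- stated objective: alternative
-- what changed: Replaced the single stateful counter/margin pass by a two-stage structure: first collect the maximal runs of sub-400 values (start+1, length), then select the first run longer than consecutive_zeros, falling back to the last run's start+1 or 0.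
import Mathlib
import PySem

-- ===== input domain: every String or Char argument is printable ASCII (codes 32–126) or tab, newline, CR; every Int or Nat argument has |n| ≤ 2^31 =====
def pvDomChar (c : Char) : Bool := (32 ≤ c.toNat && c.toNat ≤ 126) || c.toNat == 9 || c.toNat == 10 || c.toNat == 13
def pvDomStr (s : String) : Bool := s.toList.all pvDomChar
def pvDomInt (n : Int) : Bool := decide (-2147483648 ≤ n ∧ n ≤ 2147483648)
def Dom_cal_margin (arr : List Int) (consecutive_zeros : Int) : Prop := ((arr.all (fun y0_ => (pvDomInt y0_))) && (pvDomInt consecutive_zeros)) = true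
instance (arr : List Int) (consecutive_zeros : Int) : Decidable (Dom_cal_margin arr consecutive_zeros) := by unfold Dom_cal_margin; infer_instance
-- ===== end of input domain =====

-- B restructures A's single stateful counter pass as "collect the maximal sub-400 runs, then
-- select one" (alternative decomposition, same O(n) cost); both programs are pure.

-- ===== PORT A =====
-- the for-loop with break, as structural recursion over the index list; (margin, count) is the state
def cal_margin_go (arr : List Int) (cz : Int) : List Int → Int → Int → Int
  | [], margin, _count => margin
  | i :: rest, margin, count =>
    let ai := PySem.List.pyGetD arr i 0   -- i ∈ range(1, len(arr)) is always in range
    let now : Int := if ai < 400 then 0 else ai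
    let prev : Int := if ai < 400 then 0 else ai
    if now = prev ∧ prev = 0 then
      let count' := count + 1
      let margin' := if count' = 1 then i + 1 else margin
      if count' > cz then margin'   -- break
      else cal_margin_go arr cz rest margin' count'
    else
      cal_margin_go arr cz rest margin 0

def cal_margin (arr : List Int) (consecutive_zeros : Int) : Int :=
  cal_margin_go arr consecutive_zeros (PySem.List.pyRange 1 arr.length 1) 0 0

-- ===== PORT B =====
-- inner while: length of the sub-400 prefix (as Python's j - i, an int) and the remainder
def takeRun : List Int → Int × List Int
  | [] => (0, [])
  | x :: rest => if x < 400 then ((takeRun rest).1 + 1, (takeRun rest).2) else (0, x :: rest)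

lemma takeRun_snd_length_le (xs : List Int) : (takeRun xs).2.length ≤ xs.length := by
  induction xs with
  | nil => simp [takeRun]
  | cons x rest ih =>
    by_cases hx : x < 400 <;> simp [takeRun, hx]
    omega

-- outer while over the suffix arr[1:], index counter i as in Source B; records (i+1, run length)
def collectRuns : List Int → Int → List (Int × Int)
  | [], _ => []
  | x :: rest, i =>
    if x < 400 then
      (i + 1, (takeRun rest).1 + 1) :: collectRuns (takeRun rest).2 (i + ((takeRun rest).1 + 1))
    else
      collectRuns rest (i + 1)
termination_by xs _ => xs.length
decreasing_by
  · exact Nat.lt_succ_of_le (takeRun_snd_length_le rest)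
  · simp

-- stage 2 loop: first run longer than consecutive_zeros
def pickRun (cz : Int) : List (Int × Int) → Option Int
  | [] => none
  | (m, len) :: rest => if len > cz then some m else pickRun cz rest

def cal_margin_alt (arr : List Int) (consecutive_zeros : Int) : Int :=
  let runs := collectRuns (arr.drop 1) 1
  match pickRun consecutive_zeros runs with
  | some m => m
  | none =>
    match runs.getLast? with
    | some r => r.1
    | none => 0

-- ===== PRECONDITION & SPEC =====
def Spec_cal_margin (arr : List Int) (consecutive_zeros : Int) (out : Int) : Prop := out = cal_margin_alt arr consecutive_zeros
instance (arr : List Int) (consecutive_zeros : Int) (out : Int) : Decidable (Spec_cal_margin arr consecutive_zeros out) := by unfold Spec_cal_margin; infer_instance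

-- ===== CLAIM (what is proved, stated in full; the proofs are below) =====
def Claim_equal_cal_margin : Prop := ∀ (arr : List Int) (consecutive_zeros : Int), Dom_cal_margin arr consecutive_zeros → Spec_cal_margin arr consecutive_zeros (cal_margin arr consecutive_zeros)

-- ===== LEMMAS AND PROOFS =====

-- A's loop rephrased over the list suffix (p = i + 1, the margin candidate)
def loopA (cz : Int) : List Int → Int → Int → Int → Int
  | [], _, margin, _ => margin
  | x :: rest, p, margin, count =>
    if x < 400 then
      if count + 1 > cz then (if count + 1 = 1 then p else margin)
      else loopA cz rest (p + 1) (if count + 1 = 1 then p else margin) (count + 1)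
    else loopA cz rest (p + 1) margin 0

-- B's selection stage with an explicit fallback m (cal_margin_alt uses m = 0)
def sel (cz : Int) (runs : List (Int × Int)) (m : Int) : Int :=
  match pickRun cz runs with
  | some x => x
  | none =>
    match runs.getLast? with
    | some r => r.1
    | none => m

lemma takeRun_fst_nonneg (xs : List Int) : 0 ≤ (takeRun xs).1 := by
  induction xs with
  | nil => simp [takeRun]
  | cons x rest ih => by_cases hx : x < 400 <;> simp [takeRun, hx]; omega

-- bridge: A's literal port over pyRange equals loopA over the dropped suffix
lemma go_eq_loopA (arr : List Int) (cz : Int) :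
    ∀ (fuel k : Nat) (margin count : Int), arr.length ≤ k + fuel →
      cal_margin_go arr cz (PySem.List.pyRange (k : Int) (arr.length : Int) 1) margin count
        = loopA cz (arr.drop k) ((k : Int) + 1) margin count := by
  intro fuel
  induction fuel with
  | zero =>
    intro k margin count hk
    rw [PySem.List.pyRange_one_eq_nil (by exact_mod_cast Nat.le_of_lt_succ (Nat.lt_succ_of_le (by omega)))]
    rw [List.drop_eq_nil_of_le (by omega)]
    rfl
  | succ fuel ih =>
    intro k margin count hk
    by_cases h : k < arr.length
    · rw [PySem.List.pyRange_one_cons (by exact_mod_cast h)]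
      rw [List.drop_eq_getElem_cons h]
      have hget : PySem.List.pyGetD arr (k : Int) 0 = arr[k] :=
        PySem.List.pyGetD_ofNat arr k 0 h
      have hcast : ((k : Int) + 1) = ((k + 1 : Nat) : Int) := by push_cast; ring
      simp only [cal_margin_go, loopA, hget]
      by_cases ha : arr[k] < 400
      · simp only [if_pos ha]
        rw [if_pos (show True ∧ True from ⟨trivial, trivial⟩)]
        by_cases hb : count + 1 > cz
        · rw [if_pos hb, if_pos hb]
        · rw [if_neg hb, if_neg hb, hcast, ih (k + 1) _ _ (by omega)]
      · have hne : ¬ (True ∧ arr[k] = 0) := by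
          rintro ⟨-, h0⟩; omega
        simp only [if_neg ha]
        rw [if_neg hne, hcast, ih (k + 1) _ _ (by omega)]
    · rw [PySem.List.pyRange_one_eq_nil (by exact_mod_cast Nat.le_of_not_lt h)]
      rw [List.drop_eq_nil_of_le (by omega)]
      rfl

-- inside a run: consuming the sub-400 prefix either trips the break or ends the run
lemma loopA_run (cz : Int) :
    ∀ (xs : List Int) (p m c : Int), 1 ≤ c → c ≤ cz →
      loopA cz xs p m c
        = if c + (takeRun xs).1 > cz then m
          else loopA cz (takeRun xs).2 (p + (takeRun xs).1) m 0 := by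
  intro xs
  induction xs with
  | nil =>
    intro p m c h1 h2
    simp only [takeRun]
    rw [if_neg (by omega)]
    rfl
  | cons x rest ih =>
    intro p m c h1 h2
    by_cases hx : x < 400
    · have hT := takeRun_fst_nonneg rest
      have hne : ¬ (c + 1 = 1) := by omega
      simp only [loopA, hx, if_true, hne, if_false, takeRun]
      by_cases hb : c + 1 > cz
      · rw [if_pos hb, if_pos (by omega)]
      · rw [if_neg hb, ih (p + 1) m (c + 1) (by omega) (by omega)]
        have e1 : c + 1 + (takeRun rest).1 = c + ((takeRun rest).1 + 1) := by ring
        have e2 : p + 1 + (takeRun rest).1 = p + ((takeRun rest).1 + 1) := by ring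
        rw [e1, e2]
    · simp only [takeRun, hx, if_false]
      rw [if_neg (by omega)]
      have : loopA cz (x :: rest) p m c = loopA cz rest (p + 1) m 0 := by
        simp [loopA, hx]
      rw [this]
      have : loopA cz (x :: rest) (p + 0) m 0 = loopA cz rest (p + 0 + 1) m 0 := by
        simp [loopA, hx]
      rw [this]
      norm_num

lemma sel_cons (cz q L : Int) (tr : List (Int × Int)) (m : Int) (h : ¬ L > cz) :
    sel cz ((q, L) :: tr) m = sel cz tr q := by
  simp only [sel, pickRun, if_neg h]
  cases hp : pickRun cz tr with
  | some x => rfl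
  | none =>
    cases tr with
    | nil => rfl
    | cons a t =>
      rw [List.getLast?_cons_cons]
      cases h2 : (a :: t).getLast? with
      | none => simp at h2
      | some r => rfl

-- main invariant: the stateful pass between runs equals "select from the collected runs,
-- falling back to the current margin m"
lemma loopA_eq_sel (cz : Int) :
    ∀ (n : Nat) (xs : List Int), xs.length ≤ n → ∀ (i m : Int),
      loopA cz xs (i + 1) m 0 = sel cz (collectRuns xs i) m := by
  intro n
  induction n with
  | zero =>
    intro xs hxs i m
    rw [List.length_eq_zero_iff.mp (Nat.le_zero.mp hxs)]
    simp [loopA, collectRuns, sel, pickRun]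
  | succ n ih =>
    intro xs hxs i m
    cases xs with
    | nil => simp [loopA, collectRuns, sel, pickRun]
    | cons x rest =>
      by_cases hx : x < 400
      · have hT := takeRun_fst_nonneg rest
        rw [collectRuns]
        simp only [hx, if_true]
        by_cases h1 : (1 : Int) > cz
        · have : loopA cz (x :: rest) (i + 1) m 0 = i + 1 := by
            simp only [loopA]
            rw [if_pos hx, if_pos (show (0 : Int) + 1 > cz by omega),
              if_pos (show (0 : Int) + 1 = 1 by norm_num)]
          rw [this]
          simp [sel, pickRun, show (takeRun rest).1 + 1 > cz by omega]
        · have step : loopA cz (x :: rest) (i + 1) m 0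
              = loopA cz rest (i + 1 + 1) (i + 1) 1 := by
            simp [loopA, hx, h1]
          rw [step, loopA_run cz rest (i + 1 + 1) (i + 1) 1 le_rfl (by omega)]
          by_cases hb : (takeRun rest).1 + 1 > cz
          · rw [if_pos (by omega)]
            simp [sel, pickRun, hb]
          · rw [if_neg (by omega)]
            rw [sel_cons cz (i + 1) ((takeRun rest).1 + 1) _ m hb]
            have e : i + 1 + 1 + (takeRun rest).1 = (i + ((takeRun rest).1 + 1)) + 1 := by ring
            rw [e]
            exact ih (takeRun rest).2
              (le_trans (takeRun_snd_length_le rest) (by simpa using Nat.le_of_succ_le_succ hxs))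
              (i + ((takeRun rest).1 + 1)) (i + 1)
      · have step : loopA cz (x :: rest) (i + 1) m 0
            = loopA cz rest ((i + 1) + 1) m 0 := by
          simp [loopA, hx]
        rw [collectRuns]
        simp only [hx, if_false]
        rw [step]
        exact ih rest (by simpa using Nat.le_of_succ_le_succ hxs) (i + 1) m

lemma alt_eq_sel (arr : List Int) (cz : Int) :
    cal_margin_alt arr cz = sel cz (collectRuns (arr.drop 1) 1) 0 := rfl

-- ===== VERDICT (by name: the statement is the Claim_ definition above) =====
theorem cal_margin_spec : Claim_equal_cal_margin := by
  intro arr cz _dom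
  show cal_margin arr cz = cal_margin_alt arr cz
  rw [alt_eq_sel]
  have h1 : cal_margin arr cz
      = loopA cz (arr.drop 1) ((1 : Nat) + 1 : Int) 0 0 := by
    have := go_eq_loopA arr cz arr.length 1 0 0 (by omega)
    simpa [cal_margin] using this
  rw [h1]
  have : (((1 : Nat) : Int) + 1) = (1 : Int) + 1 := by norm_num
  rw [this]
  exact loopA_eq_sel cz arr.length (arr.drop 1) (by simp) 1 0
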